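-- pv_equiv track=rewrite | github.com/vdmai/plugin.video.tam | saver.py | find_e
-- ===== SOURCE A (Python) =====
-- def find_e(t):
-- 		S=['e','E','[']
-- 		n=["0","1","2","3","4","5","6","7","8","9"]
-- 		for i in S:
-- 			for j in n:
-- 				for k in n:
-- 					ss=i+j+k
-- 					if t.find(ss)>0: return t.find(ss)+1
-- 		return -1
-- ===== SOURCE B (Python) =====
-- def find_e(t):
--     # One pass: record the first occurrence index of every candidate trigram,
--     # then check the 300 patterns in priority order against the index.
--     first = {}
--     for p in range(len(t) - 2):
--         c0 = t[p]
--         if (c0 == 'e' or c0 == 'E' or c0 == '[') and ('0' <= t[p+1] <= '9') and ('0' <= t[p+2] <= '9'):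
--             tri = c0 + t[p+1] + t[p+2]
--             if tri not in first:
--                 first[tri] = p
--     for i in "eE[":
--         for j in "0123456789":
--             for k in "0123456789":
--                 pos = first.get(i + j + k, -1)
--                 if pos > 0:
--                     return pos + 1
--     return -1
-- ===== Notes on version B (the rewrite author's own statement) =====
-- stated objective: alternative
-- what changed: Replaces 300 full-string find() scans (one per pattern, in priority order) by a single pass that records the first index of each qualifying trigram in a dict, followed by 300 O(1) lookups in the same priority order.
import Mathlib
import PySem

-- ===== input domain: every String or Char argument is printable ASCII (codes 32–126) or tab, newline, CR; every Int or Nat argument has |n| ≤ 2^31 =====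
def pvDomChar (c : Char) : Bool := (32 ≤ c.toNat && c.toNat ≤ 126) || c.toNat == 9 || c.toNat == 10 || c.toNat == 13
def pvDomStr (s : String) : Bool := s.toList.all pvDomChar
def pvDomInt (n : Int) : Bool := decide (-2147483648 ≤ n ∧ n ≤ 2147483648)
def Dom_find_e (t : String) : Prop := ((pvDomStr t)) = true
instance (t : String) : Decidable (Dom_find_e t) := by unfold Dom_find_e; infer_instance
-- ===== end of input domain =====

-- B replaces A's 300 whole-string scans by one pass building a trigram→first-index dict
-- plus 300 lookups in the same priority order (objective: alternative algorithm).

-- ===== PORT A =====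
def pvS : List String := ["e", "E", "["]
def pvN : List String := ["0", "1", "2", "3", "4", "5", "6", "7", "8", "9"]

def pvKLoopA (t : String) (i j : String) : List String → Option Int
  | [] => none
  | k :: ks =>
    let ss := i ++ j ++ k
    if PySem.Str.find t ss > 0 then some (PySem.Str.find t ss + 1) else pvKLoopA t i j ks

def pvJLoopA (t : String) (i : String) : List String → Option Int
  | [] => none
  | j :: js =>
    match pvKLoopA t i j pvN with
    | some r => some r
    | none => pvJLoopA t i js

def pvILoopA (t : String) : List String → Option Int
  | [] => none
  | i :: is =>
    match pvJLoopA t i pvN with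
    | some r => some r
    | none => pvILoopA t is

def find_e (t : String) : Int := (pvILoopA t pvS).getD (-1)

-- ===== PORT B =====
def pvSC : List Char := ['e', 'E', '[']
def pvNC : List Char := ['0', '1', '2', '3', '4', '5', '6', '7', '8', '9']

def pvScanStep (cs : List Char) (d : PySem.Dict (List Char) Int) (p : Nat) :
    PySem.Dict (List Char) Int :=
  let c0 := cs.getD p ' '
  if (c0 = 'e' ∨ c0 = 'E' ∨ c0 = '[') ∧
     ('0' ≤ cs.getD (p+1) ' ' ∧ cs.getD (p+1) ' ' ≤ '9') ∧
     ('0' ≤ cs.getD (p+2) ' ' ∧ cs.getD (p+2) ' ' ≤ '9') then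
    let tri := [c0, cs.getD (p+1) ' ', cs.getD (p+2) ' ']
    if (d.get? tri).isNone then d.insert tri (p : Int) else d
  else d

def pvScan (cs : List Char) : PySem.Dict (List Char) Int :=
  (List.range (cs.length - 2)).foldl (pvScanStep cs) PySem.Dict.empty

def pvKLoopB (d : PySem.Dict (List Char) Int) (i j : Char) : List Char → Option Int
  | [] => none
  | k :: ks =>
    let pos := d.getD [i, j, k] (-1)
    if pos > 0 then some (pos + 1) else pvKLoopB d i j ks

def pvJLoopB (d : PySem.Dict (List Char) Int) (i : Char) : List Char → Option Int
  | [] => none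
  | j :: js =>
    match pvKLoopB d i j pvNC with
    | some r => some r
    | none => pvJLoopB d i js

def pvILoopB (d : PySem.Dict (List Char) Int) : List Char → Option Int
  | [] => none
  | i :: is =>
    match pvJLoopB d i pvNC with
    | some r => some r
    | none => pvILoopB d is

def find_e_alt (t : String) : Int := (pvILoopB (pvScan t.toList) pvSC).getD (-1)

-- ===== PRECONDITION & SPEC =====
def Spec_find_e (t : String) (out : Int) : Prop := out = find_e_alt t
instance (t : String) (out : Int) : Decidable (Spec_find_e t out) := by unfold Spec_find_e; infer_instance

-- ===== CLAIM (what is proved, stated in full; the proofs are below) =====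
def Claim_equal_find_e : Prop := ∀ (t : String), Dom_find_e t → Spec_find_e t (find_e t)

-- ===== LEMMAS AND PROOFS =====

-- `take 3` of a drop, written with the `getD`s the scan step reads
theorem pv_take3 : ∀ (cs : List Char) (m : Nat), m + 2 < cs.length →
    (cs.drop m).take 3 = [cs.getD m ' ', cs.getD (m+1) ' ', cs.getD (m+2) ' ']
  | [], m, h => by simp at h
  | x :: cs, 0, h => by
      cases cs with
      | nil => simp at h
      | cons y cs =>
        cases cs with
        | nil => simp at h
        | cons z cs => simp [List.getD]
  | x :: cs, m+1, h => by
      simp only [List.drop_succ_cons, List.getD_cons_succ]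
      exact pv_take3 cs m (by simp only [List.length_cons] at h; omega)

-- a trigram occurs at position m iff the three read characters match and the read is in range
theorem pv_occ_iff (cs : List Char) (m : Nat) (x y z : Char) :
    [x, y, z] <+: cs.drop m ↔
      (m + 2 < cs.length ∧ cs.getD m ' ' = x ∧ cs.getD (m+1) ' ' = y ∧ cs.getD (m+2) ' ' = z) := by
  constructor
  · intro h
    have hlen : 3 ≤ (cs.drop m).length := by simpa using h.length_le
    rw [List.length_drop] at hlen
    have hm : m + 2 < cs.length := by omega
    have ht := pv_take3 cs m hm
    rw [List.prefix_iff_eq_take] at h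
    simp only [List.length_cons, List.length_nil] at h
    rw [ht] at h
    simp only [List.cons.injEq, and_true] at h
    exact ⟨hm, h.1.symm, h.2.1.symm, h.2.2.symm⟩
  · rintro ⟨hm, hx, hy, hz⟩
    rw [List.prefix_iff_eq_take]
    simp only [List.length_cons, List.length_nil]
    rw [pv_take3 cs m hm, hx, hy, hz]

-- the invariant of B's single pass: after scanning positions [0, m) the dict holds,
-- at key [a,b,c], exactly the first occurrence of that trigram if it lies below m
theorem pv_scan_inv (cs : List Char) (a b c : Char)
    (ha : a = 'e' ∨ a = 'E' ∨ a = '[') (hb : '0' ≤ b ∧ b ≤ '9') (hc : '0' ≤ c ∧ c ≤ '9')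
    (m : Nat) :
    ((List.range m).foldl (pvScanStep cs) PySem.Dict.empty).get? [a, b, c] =
      if 0 ≤ PySem.Chars.find cs [a, b, c] ∧ (PySem.Chars.find cs [a, b, c]).toNat < m
      then some (PySem.Chars.find cs [a, b, c]) else none := by
  induction m with
  | zero => simp [PySem.Dict.get?_empty]
  | succ m ih =>
    rw [List.range_succ, List.foldl_append, List.foldl_cons, List.foldl_nil]
    set F := PySem.Chars.find cs [a, b, c] with hF
    set d := (List.range m).foldl (pvScanStep cs) PySem.Dict.empty with hd
    simp only [pvScanStep]
    by_cases hfilt : (cs.getD m ' ' = 'e' ∨ cs.getD m ' ' = 'E' ∨ cs.getD m ' ' = '[') ∧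
        ('0' ≤ cs.getD (m+1) ' ' ∧ cs.getD (m+1) ' ' ≤ '9') ∧
        ('0' ≤ cs.getD (m+2) ' ' ∧ cs.getD (m+2) ' ' ≤ '9')
    · rw [if_pos hfilt]
      by_cases htri : ([cs.getD m ' ', cs.getD (m+1) ' ', cs.getD (m+2) ' '] : List Char) = [a, b, c]
      · -- the trigram at m IS our key: it occurs at m
        simp only [List.cons.injEq, and_true] at htri
        obtain ⟨h0, h1, h2⟩ := htri
        have hm2 : m + 2 < cs.length := by
          by_contra hh
          have := List.getD_eq_default cs ' ' (n := m+2) (by omega)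
          rw [this] at h2
          rw [← h2] at hc
          exact absurd hc.1 (by decide)
        have hocc : [a, b, c] <+: cs.drop m := (pv_occ_iff cs m a b c).mpr ⟨hm2, h0, h1, h2⟩
        have hFpos : 0 ≤ F := by
          rw [hF, PySem.Chars.find_nonneg_iff]
          exact (PySem.Chars.isIn_iff_infix _ _).mp
            ((PySem.Chars.exists_prefix_drop_iff_isIn (s := cs) (sub := [a,b,c])).mp ⟨m, hocc⟩)
        have hspec := PySem.Chars.find_spec (s := cs) (sub := [a, b, c]) hFpos
        have hle : F.toNat ≤ m := by
          by_contra hh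
          exact hspec.2 m (by omega) hocc
        by_cases hlt : F.toNat < m
        · have hsome : d.get? [a, b, c] = some F := by rw [ih]; simp [hFpos, hlt]
          rw [h0, h1, h2, hsome]
          simp only [Option.isNone_some, Bool.false_eq_true, if_false]
          rw [hsome, if_pos ⟨hFpos, by omega⟩]
        · have hFm : F.toNat = m := by omega
          have hnone : d.get? [a, b, c] = none := by rw [ih]; simp [hlt]
          rw [h0, h1, h2, hnone]
          simp only [Option.isNone_none, if_true]
          rw [PySem.Dict.get?_insert_self, if_pos ⟨hFpos, by omega⟩]
          have : F = (m : Int) := by omega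
          rw [this]
      · -- the trigram at m is a different key: our key's entry is untouched, and no occurrence at m
        have hocc' : ¬ [a, b, c] <+: cs.drop m := by
          rw [pv_occ_iff]
          rintro ⟨hm2, hx, hy, hz⟩
          exact htri (by rw [hx, hy, hz])
        have hcond : (0 ≤ F ∧ F.toNat < m + 1) ↔ (0 ≤ F ∧ F.toNat < m) := by
          constructor
          · rintro ⟨h0, hlt⟩
            refine ⟨h0, ?_⟩
            rcases Nat.lt_succ_iff_lt_or_eq.mp hlt with h | h
            · exact h
            · exact absurd (h ▸ (PySem.Chars.find_spec (s := cs) (sub := [a,b,c]) h0).1) hocc'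
          · rintro ⟨h0, hlt⟩; exact ⟨h0, by omega⟩
        have hget : ∀ (d' : PySem.Dict (List Char) Int),
            (d'.insert [cs.getD m ' ', cs.getD (m+1) ' ', cs.getD (m+2) ' '] (m : Int)).get? [a, b, c]
              = d'.get? [a, b, c] := by
          intro d'
          rw [PySem.Dict.get?_insert, if_neg (fun h => htri h.symm)]
        by_cases hn : (d.get? [cs.getD m ' ', cs.getD (m+1) ' ', cs.getD (m+2) ' ']).isNone
        · rw [if_pos hn, hget, ih]
          exact if_congr hcond.symm rfl rfl
        · rw [if_neg hn, ih]
          exact if_congr hcond.symm rfl rfl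
    · -- the filter fails at m: nothing inserted, and no occurrence of our key at m either
      rw [if_neg hfilt]
      have hocc' : ¬ [a, b, c] <+: cs.drop m := by
        rw [pv_occ_iff]
        rintro ⟨hm2, hx, hy, hz⟩
        exact hfilt ⟨by rw [hx]; exact ha, by rw [hy]; exact hb, by rw [hz]; exact hc⟩
      have hcond : (0 ≤ F ∧ F.toNat < m + 1) ↔ (0 ≤ F ∧ F.toNat < m) := by
        constructor
        · rintro ⟨h0, hlt⟩
          refine ⟨h0, ?_⟩
          rcases Nat.lt_succ_iff_lt_or_eq.mp hlt with h | h
          · exact h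
          · exact absurd (h ▸ (PySem.Chars.find_spec (s := cs) (sub := [a,b,c]) h0).1) hocc'
        · rintro ⟨h0, hlt⟩; exact ⟨h0, by omega⟩
      rw [ih]
      exact if_congr hcond.symm rfl rfl

-- the key fact: B's dict lookup with default -1 agrees with Python's str.find
theorem find_e_key (cs : List Char) (a b c : Char)
    (ha : a = 'e' ∨ a = 'E' ∨ a = '[') (hb : '0' ≤ b ∧ b ≤ '9') (hc : '0' ≤ c ∧ c ≤ '9') :
    (pvScan cs).getD [a, b, c] (-1) = PySem.Chars.find cs [a, b, c] := by
  have hinv := pv_scan_inv cs a b c ha hb hc (cs.length - 2)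
  rw [pvScan, PySem.Dict.getD_eq_get?_getD, hinv]
  set F := PySem.Chars.find cs [a, b, c] with hF
  by_cases h0 : 0 ≤ F
  · have hspec := PySem.Chars.find_spec (s := cs) (sub := [a, b, c]) h0
    have hlen : 3 ≤ (cs.drop F.toNat).length := by simpa using hspec.1.length_le
    rw [List.length_drop] at hlen
    rw [if_pos ⟨h0, by omega⟩]
    rfl
  · have hneg : F = -1 := by
      have := PySem.Chars.neg_one_le_find cs [a, b, c]
      omega
    rw [if_neg (by omega)]
    simp [hneg]

-- shape facts for the loop variables
theorem pv_shape_b (x : Char) (hx : x ∈ pvNC) : '0' ≤ x ∧ x ≤ '9' := by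
  fin_cases hx <;> exact ⟨by decide, by decide⟩

theorem pv_shape_a (x : Char) (hx : x ∈ pvSC) : x = 'e' ∨ x = 'E' ∨ x = '[' := by
  fin_cases hx <;> simp

-- level-by-level equality of the two priority loops
theorem pv_kloop_eq (t : String) (a b : Char) (ha : a ∈ pvSC) (hb : b ∈ pvNC)
    (ks : List Char) (hks : ∀ x ∈ ks, x ∈ pvNC) :
    pvKLoopA t (String.ofList [a]) (String.ofList [b]) (ks.map (fun c => String.ofList [c]))
      = pvKLoopB (pvScan t.toList) a b ks := by
  induction ks with
  | nil => simp [pvKLoopA, pvKLoopB]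
  | cons c ks ih =>
    simp only [List.map_cons, pvKLoopA, pvKLoopB]
    have hfind : PySem.Str.find t (String.ofList [a] ++ String.ofList [b] ++ String.ofList [c])
        = PySem.Chars.find t.toList [a, b, c] := by
      simp
    have hkey : (pvScan t.toList).getD [a, b, c] (-1) = PySem.Chars.find t.toList [a, b, c] :=
      find_e_key t.toList a b c (pv_shape_a a ha) (pv_shape_b b hb)
        (pv_shape_b c (hks c List.mem_cons_self))
    rw [hfind, hkey]
    split
    · rfl
    · exact ih (fun x hx => hks x (List.mem_cons_of_mem _ hx))

theorem pv_jloop_eq (t : String) (a : Char) (ha : a ∈ pvSC)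
    (js : List Char) (hjs : ∀ x ∈ js, x ∈ pvNC) :
    pvJLoopA t (String.ofList [a]) (js.map (fun c => String.ofList [c]))
      = pvJLoopB (pvScan t.toList) a js := by
  induction js with
  | nil => simp [pvJLoopA, pvJLoopB]
  | cons j js ih =>
    simp only [List.map_cons, pvJLoopA, pvJLoopB]
    have hN : pvN = pvNC.map (fun c => String.ofList [c]) := rfl
    rw [hN, pv_kloop_eq t a j ha (hjs j List.mem_cons_self) pvNC (fun x hx => hx)]
    rw [ih (fun x hx => hjs x (List.mem_cons_of_mem _ hx))]

theorem pv_iloop_eq (t : String) (is : List Char) (his : ∀ x ∈ is, x ∈ pvSC) :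
    pvILoopA t (is.map (fun c => String.ofList [c])) = pvILoopB (pvScan t.toList) is := by
  induction is with
  | nil => simp [pvILoopA, pvILoopB]
  | cons i is ih =>
    simp only [List.map_cons, pvILoopA, pvILoopB]
    have hN : pvN = pvNC.map (fun c => String.ofList [c]) := rfl
    rw [hN, pv_jloop_eq t i (his i List.mem_cons_self) pvNC (fun x hx => hx)]
    rw [ih (fun x hx => his x (List.mem_cons_of_mem _ hx))]

theorem find_e_main (t : String) : find_e t = find_e_alt t := by
  rw [find_e, find_e_alt]
  have hS : pvS = pvSC.map (fun c => String.ofList [c]) := rfl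
  rw [hS, pv_iloop_eq t pvSC (fun x hx => hx)]

-- ===== VERDICT (by name: the statement is the Claim_ definition above) =====
theorem find_e_spec : Claim_equal_find_e := by
  intro t _
  unfold Spec_find_e
  exact find_e_main t
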